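-- pv_equiv track=rewrite | github.com/wtthornton/TappsMCP | packages/docs-mcp/src/docs_mcp/extractors/generic.py | _go_comment_before
-- ===== SOURCE A (Python) =====
-- def _go_comment_before(lines: list[str], def_line_idx: int) -> str | None:
--     """Collect ``//`` comment lines immediately before a Go definition."""
--     doc_lines: list[str] = []
--     idx = def_line_idx - 1  # 0-based index of line before definition
--     while idx >= 0:
--         stripped = lines[idx].strip()
--         if stripped.startswith("//"):
--             doc_lines.append(stripped.lstrip("/").strip())
--             idx -= 1
--         else:
--             break
--     if doc_lines:
--         doc_lines.reverse()
--         return "\n".join(doc_lines)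
--     return None
-- ===== SOURCE B (Python) =====
-- def _go_comment_before(lines: list[str], def_line_idx: int) -> str | None:
--     """Collect ``//`` comment lines immediately before a Go definition.
--
--     Single forward pass: keep the current run of comment lines, resetting on
--     any non-comment line; the run alive at index def_line_idx is the answer.
--     """
--     block: list[str] = []
--     for i in range(def_line_idx):
--         stripped = lines[i].strip()
--         if stripped.startswith("//"):
--             block.append(stripped.lstrip("/").strip())
--         else:
--             block = []
--     if block:
--         return "\n".join(block)
--     return None
-- ===== Notes on version B (the rewrite author's own statement) =====
-- stated objective: alternative
-- what changed: Replaces A's backward while-loop (walk up from def_line_idx-1, append, then reverse before joining) with a single forward pass over indices 0..def_line_idx-1 that maintains the current comment run, resetting it on any non-comment line; no reversal and opposite traversal direction.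
import Mathlib
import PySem

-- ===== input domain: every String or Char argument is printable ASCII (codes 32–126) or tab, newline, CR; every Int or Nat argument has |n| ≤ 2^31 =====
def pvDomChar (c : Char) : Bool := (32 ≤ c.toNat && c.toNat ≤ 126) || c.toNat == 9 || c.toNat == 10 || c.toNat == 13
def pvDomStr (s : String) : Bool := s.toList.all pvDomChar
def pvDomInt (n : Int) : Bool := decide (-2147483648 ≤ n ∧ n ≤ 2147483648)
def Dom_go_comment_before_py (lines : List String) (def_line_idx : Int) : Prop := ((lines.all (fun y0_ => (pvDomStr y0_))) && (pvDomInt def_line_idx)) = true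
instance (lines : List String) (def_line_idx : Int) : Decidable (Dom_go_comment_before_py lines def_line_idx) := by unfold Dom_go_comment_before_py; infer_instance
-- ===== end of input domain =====

-- ===== PORT A =====
-- B rewrites A's backward walk-and-reverse as a single forward pass with a resetting run (alternative decomposition; same cost).
-- s.lstrip("/") with the one-char set {'/'}: drop all leading '/' characters (exact, hand port).
def pvLstripSlash (s : String) : String := String.ofList (s.toList.dropWhile (fun c => c == '/'))

-- A's while-loop, descending from index k to 0, accumulating cleaned comment lines (append order, as in A).
def goA_loop (lines : List String) : Nat → List String → List String
  | 0, acc =>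
    let stripped := PySem.Str.strip ((PySem.List.pyGet? lines (0 : Int)).getD "")
    if PySem.Str.startswith stripped "//" then acc ++ [PySem.Str.strip (pvLstripSlash stripped)]
    else acc
  | k+1, acc =>
    let stripped := PySem.Str.strip ((PySem.List.pyGet? lines ((k+1 : Nat) : Int)).getD "")
    if PySem.Str.startswith stripped "//" then
      goA_loop lines k (acc ++ [PySem.Str.strip (pvLstripSlash stripped)])
    else acc

def go_comment_before_py (lines : List String) (def_line_idx : Int) : Option String :=
  let doc_lines := if 0 ≤ def_line_idx - 1 then goA_loop lines (def_line_idx - 1).toNat [] else []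
  if doc_lines ≠ [] then some (PySem.Str.join "\n" doc_lines.reverse) else none

-- ===== PORT B =====
def go_comment_before_py_alt (lines : List String) (def_line_idx : Int) : Option String :=
  let block := (PySem.List.pyRange 0 def_line_idx 1).foldl (fun block i =>
      let stripped := PySem.Str.strip ((PySem.List.pyGet? lines i).getD "")
      if PySem.Str.startswith stripped "//" then
        block ++ [PySem.Str.strip (pvLstripSlash stripped)]
      else []) []
  if block ≠ [] then some (PySem.Str.join "\n" block) else none

-- ===== PRECONDITION & SPEC =====
-- A raises IndexError when def_line_idx - 1 is a valid loop start beyond the list (def_line_idx > len(lines)).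
def Pre_go_comment_before_py (lines : List String) (def_line_idx : Int) : Prop :=
  def_line_idx ≤ (lines.length : Int)
instance (lines : List String) (def_line_idx : Int) : Decidable (Pre_go_comment_before_py lines def_line_idx) := by
  unfold Pre_go_comment_before_py; infer_instance
def pvWitness_go_comment_before_py : List String × Int := (["// hi", "func f() {}"], 1)
def Spec_go_comment_before_py (lines : List String) (def_line_idx : Int) (out : Option String) : Prop := out = go_comment_before_py_alt lines def_line_idx
instance (lines : List String) (def_line_idx : Int) (out : Option String) : Decidable (Spec_go_comment_before_py lines def_line_idx out) := by unfold Spec_go_comment_before_py; infer_instance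

-- ===== CLAIM (what is proved, stated in full; the proofs are below) =====
def Claim_equal_go_comment_before_py : Prop := ∀ (lines : List String) (def_line_idx : Int), Dom_go_comment_before_py lines def_line_idx → Pre_go_comment_before_py lines def_line_idx → Spec_go_comment_before_py lines def_line_idx (go_comment_before_py lines def_line_idx)

-- ===== LEMMAS AND PROOFS =====
-- the comment test and the cleaned form of line k
def pvIsC (lines : List String) (i : Int) : Bool :=
  PySem.Str.startswith (PySem.Str.strip ((PySem.List.pyGet? lines i).getD "")) "//"
def pvClean (lines : List String) (i : Int) : String :=
  PySem.Str.strip (pvLstripSlash (PySem.Str.strip ((PySem.List.pyGet? lines i).getD "")))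

-- B's fold over range(0, d)
def pvFB (lines : List String) (d : Int) : List String :=
  (PySem.List.pyRange 0 d 1).foldl (fun block i =>
      let stripped := PySem.Str.strip ((PySem.List.pyGet? lines i).getD "")
      if PySem.Str.startswith stripped "//" then
        block ++ [PySem.Str.strip (pvLstripSlash stripped)]
      else []) []

lemma goA_loop_acc (lines : List String) (k : Nat) (acc : List String) :
    goA_loop lines k acc = acc ++ goA_loop lines k [] := by
  induction k generalizing acc with
  | zero =>
    rw [goA_loop, goA_loop]
    split_ifs <;> simp
  | succ k ih =>
    rw [goA_loop, goA_loop]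
    split_ifs with h
    · rw [ih, ih ([] ++ _)]
      simp
    · simp

lemma pvFB_succ (lines : List String) (k : Nat) :
    pvFB lines ((k : Int) + 1) =
      (if pvIsC lines k then pvFB lines k ++ [pvClean lines k] else []) := by
  unfold pvFB
  rw [PySem.List.pyRange_one_succ_right (by positivity)]
  rw [List.foldl_append]
  simp [pvIsC, pvClean]

lemma goA_zero (lines : List String) (acc : List String) :
    goA_loop lines 0 acc =
      if pvIsC lines ((0 : Nat) : Int) then acc ++ [pvClean lines ((0 : Nat) : Int)] else acc := by
  rw [goA_loop]
  simp only [pvIsC, pvClean, Int.natCast_zero]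

lemma goA_succ (lines : List String) (k : Nat) (acc : List String) :
    goA_loop lines (k+1) acc =
      if pvIsC lines ((k : Int) + 1) then
        goA_loop lines k (acc ++ [pvClean lines ((k : Int) + 1)])
      else acc := by
  rw [goA_loop]
  norm_cast

lemma pvFB_zero (lines : List String) : pvFB lines 0 = [] := by
  unfold pvFB
  rw [PySem.List.pyRange_one_eq_nil le_rfl]
  rfl

lemma goA_reverse (lines : List String) (k : Nat) :
    (goA_loop lines k []).reverse = pvFB lines ((k : Int) + 1) := by
  induction k with
  | zero =>
    rw [goA_zero, pvFB_succ]
    by_cases h : pvIsC lines ((0 : Nat) : Int)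
    · simp only [Int.natCast_zero] at h ⊢
      simp [h, pvFB_zero]
    · simp only [Int.natCast_zero] at h ⊢
      simp [h]
  | succ k ih =>
    rw [goA_succ, pvFB_succ]
    by_cases h : pvIsC lines ((k : Int) + 1)
    · simp only [Int.natCast_add, Int.natCast_one] at h ⊢
      rw [if_pos h, if_pos h, goA_loop_acc]
      simp [ih]
    · simp only [Int.natCast_add, Int.natCast_one] at h ⊢
      simp [h]

-- ===== VERDICT (by name: the statement is the Claim_ definition above) =====
theorem go_comment_before_py_spec : Claim_equal_go_comment_before_py := by
  intro lines d _ _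
  unfold Spec_go_comment_before_py go_comment_before_py go_comment_before_py_alt
  by_cases hd : 0 ≤ d - 1
  · simp only [hd, if_true]
    have hk : ((d - 1).toNat : Int) = d - 1 := Int.toNat_of_nonneg hd
    have := goA_reverse lines (d - 1).toNat
    rw [hk] at this
    have hd' : d - 1 + 1 = d := by ring
    rw [hd'] at this
    have hB : (PySem.List.pyRange 0 d 1).foldl (fun block i =>
        let stripped := PySem.Str.strip ((PySem.List.pyGet? lines i).getD "")
        if PySem.Str.startswith stripped "//" then
          block ++ [PySem.Str.strip (pvLstripSlash stripped)]
        else []) [] = pvFB lines d := rfl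
    rw [hB, ← this]
    by_cases hnil : goA_loop lines (d - 1).toNat [] = []
    · simp only [hnil]
      simp
    · simp
  · simp only [hd, if_false]
    rw [PySem.List.pyRange_one_eq_nil (by omega)]
    simp
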